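-- pv_equiv track=rewrite | github.com/chaseuebelhart/Projects | TetrisAgent/evolutionaryAgent/featureFunctions.py | num_hole_rows
-- ===== SOURCE A (Python) =====
-- def num_hole_rows(board):
--     numHoleRows = 0
--     for row in range(len(board[0])-1, -1, -1):
--         rowHasHole = False
--         emptySpace = False
--         for col in range(0, len(board)):
--             if not board[col][row]:
--                 emptySpace = True
--             elif emptySpace:
--                 rowHasHole = True
--         if rowHasHole:
--             numHoleRows += 1
--     return numHoleRows
-- ===== SOURCE B (Python) =====
-- def num_hole_rows(board):
--     n = len(board[0])
--     total = 0
--     for r in range(n):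
--         vals = [bool(col[r]) for col in board]
--         lead = next((i for i, v in enumerate(vals) if not v), len(vals))
--         total += sum(vals) > lead
--     return total
-- ===== Notes on version B (the rewrite author's own statement) =====
-- stated objective: alternative
-- what changed: Replaces the reverse row scan with a running emptySpace/rowHasHole flag pair by a forward scan that transposes each row into a truthiness list and counts it as holed when its number of filled cells exceeds the length of its leading filled run.
import Mathlib
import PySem

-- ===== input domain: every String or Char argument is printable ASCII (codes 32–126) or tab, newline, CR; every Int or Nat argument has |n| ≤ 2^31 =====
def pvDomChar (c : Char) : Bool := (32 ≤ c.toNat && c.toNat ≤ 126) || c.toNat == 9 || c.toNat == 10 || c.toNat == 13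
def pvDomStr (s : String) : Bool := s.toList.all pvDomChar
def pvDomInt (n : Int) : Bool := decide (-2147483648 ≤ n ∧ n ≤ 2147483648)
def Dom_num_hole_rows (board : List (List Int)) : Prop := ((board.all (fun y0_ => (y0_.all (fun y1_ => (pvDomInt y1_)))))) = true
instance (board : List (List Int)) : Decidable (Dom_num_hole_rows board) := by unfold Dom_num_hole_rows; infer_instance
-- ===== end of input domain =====

-- B replaces A's reverse row scan with flag pair (emptySpace, rowHasHole) by a forward scan
-- comparing each row's filled-cell count with its leading filled run (objective: alternative).

-- ===== PORT A =====
-- cell accesses are exact inside Pre_ (board nonempty, indices in range); the getD defaults are never reached there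
def num_hole_rows (board : List (List Int)) : Int :=
  (PySem.List.pyRange (((PySem.List.pyGetD board 0 []).length : Int) - 1) (-1) (-1)).foldl
    (fun numHoleRows row =>
      let st :=
        (PySem.List.pyRange 0 (board.length : Int) 1).foldl
          (fun (st : Bool × Bool) col =>
            -- st = (rowHasHole, emptySpace)
            if PySem.List.pyGetD (PySem.List.pyGetD board col []) row 0 == 0 then (st.1, true)
            else if st.2 then (true, st.2) else st)
          (false, false)
      if st.1 then numHoleRows + 1 else numHoleRows)
    0

-- ===== PORT B =====
def num_hole_rows_alt (board : List (List Int)) : Int :=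
  let n : Int := ((PySem.List.pyGetD board 0 []).length : Int)
  (PySem.List.pyRange 0 n 1).foldl
    (fun total r =>
      let vals := board.map (fun col => !(PySem.List.pyGetD col r 0 == 0))
      let lead := vals.findIdx (fun v => !v)   -- next((i for i,v in enumerate(vals) if not v), len(vals))
      if lead < vals.countP id then total + 1 else total)
    0

-- ===== PRECONDITION & SPEC =====
-- Pre_ = exactly the inputs where Python A returns: nonempty board, every column at least as long as board[0]
def Pre_num_hole_rows (board : List (List Int)) : Prop :=
  board ≠ [] ∧ ∀ c ∈ board, (PySem.List.pyGetD board 0 []).length ≤ c.length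
instance (board : List (List Int)) : Decidable (Pre_num_hole_rows board) := by
  unfold Pre_num_hole_rows; infer_instance
def pvWitness_num_hole_rows : List (List Int) := [[1, 0, 1], [0, 1, 1]]

def Spec_num_hole_rows (board : List (List Int)) (out : Int) : Prop := out = num_hole_rows_alt board
instance (board : List (List Int)) (out : Int) : Decidable (Spec_num_hole_rows board out) := by
  unfold Spec_num_hole_rows; infer_instance

-- ===== CLAIM (what is proved, stated in full; the proofs are below) =====
def Claim_equal_num_hole_rows : Prop :=
  ∀ (board : List (List Int)), Dom_num_hole_rows board → Pre_num_hole_rows board →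
    Spec_num_hole_rows board (num_hole_rows board)

-- ===== LEMMAS AND PROOFS =====

-- A's inner-loop step on the truthiness of a cell; state = (rowHasHole, emptySpace)
def stepA (st : Bool × Bool) (v : Bool) : Bool × Bool :=
  if !v then (st.1, true) else if st.2 then (true, st.2) else st

-- "some true strictly after some false"
def holeAux : List Bool → Bool
  | [] => false
  | v :: vs => if v then holeAux vs else vs.any id

theorem holeAux_eq_false (vs : List Bool) (h : vs.any id = false) : holeAux vs = false := by
  induction vs with
  | nil => rfl
  | cons v vs ih =>
    simp only [List.any_cons, Bool.or_eq_false_iff] at h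
    cases v with
    | false => simp [holeAux, h.2]
    | true => exact absurd h.1 (by simp)

theorem foldA_char (vs : List Bool) : ∀ (h e : Bool),
    vs.foldl stepA (h, e) = (h || (e && vs.any id) || holeAux vs, e || vs.any (fun v => !v)) := by
  induction vs with
  | nil => intro h e; simp [holeAux]
  | cons v vs ih =>
    intro h e
    cases hX : vs.any id with
    | false =>
      cases v <;> cases e <;> simp [stepA, ih, holeAux, hX, holeAux_eq_false vs hX]
    | true =>
      cases v <;> cases e <;> simp [stepA, ih, holeAux, hX]

theorem holeAux_eq_count (vs : List Bool) :
    holeAux vs = decide (vs.findIdx (fun v => !v) < vs.countP id) := by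
  induction vs with
  | nil => simp [holeAux]
  | cons v vs ih =>
    cases v with
    | false =>
      simp only [holeAux, List.findIdx_cons, Bool.not_false, cond_true, List.countP_cons,
        id, if_neg Bool.false_ne_true, Nat.add_zero]
      rw [Bool.eq_iff_iff]
      simp only [List.any_eq_true, id_eq, decide_eq_true_iff, Nat.pos_iff_ne_zero,
        Ne, List.countP_eq_zero]
      constructor
      · rintro ⟨x, hx, hid⟩ hall; exact absurd (hall x hx) (by simp [hid])
      · intro hne
        by_contra hno
        exact hne (fun a ha => by
          by_contra hfa
          exact hno ⟨a, ha, by revert hfa; cases a <;> simp⟩)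
    | true =>
      simp [holeAux, List.findIdx_cons, ih]

-- counting fold = sum of 0/1 indicators
theorem foldl_ite_one (f : Int → Prop) [DecidablePred f] (l : List Int) : ∀ (a : Int),
    l.foldl (fun a r => if f r then a + 1 else a) a
      = a + (l.map (fun r => if f r then (1 : Int) else 0)).sum := by
  induction l with
  | nil => intro a; simp
  | cons x l ih =>
    intro a
    by_cases h : f x <;> simp [h, ih] <;> try ring

-- the counting fold is insensitive to reversal
theorem foldl_count_reverse (f : Int → Prop) [DecidablePred f] (l : List Int) :
    l.reverse.foldl (fun a r => if f r then a + 1 else a) (0 : Int)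
      = l.foldl (fun a r => if f r then a + 1 else a) (0 : Int) := by
  rw [foldl_ite_one f l.reverse 0, foldl_ite_one f l 0, List.map_reverse, List.sum_reverse]

-- the per-row indicator of A equals that of B
theorem row_indicator (board : List (List Int)) (row : Int) :
    ((PySem.List.pyRange 0 (board.length : Int) 1).foldl
        (fun (st : Bool × Bool) col =>
          if PySem.List.pyGetD (PySem.List.pyGetD board col []) row 0 == 0 then (st.1, true)
          else if st.2 then (true, st.2) else st)
        (false, false)).1
      = ((board.map (fun col => !(PySem.List.pyGetD col row 0 == 0))).findIdx (fun v => !v)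
          < (board.map (fun col => !(PySem.List.pyGetD col row 0 == 0))).countP id) := by
  rw [PySem.List.foldl_pyRange_zero_pyGetD' board ([] : List Int)
      (fun (st : Bool × Bool) col =>
        if PySem.List.pyGetD col row 0 == 0 then (st.1, true)
        else if st.2 then (true, st.2) else st) (false, false)]
  have hfun : board.foldl
      (fun (st : Bool × Bool) col =>
        if PySem.List.pyGetD col row 0 == 0 then (st.1, true)
        else if st.2 then (true, st.2) else st) (false, false)
      = (board.map (fun col => !(PySem.List.pyGetD col row 0 == 0))).foldl stepA (false, false) := by
    rw [List.foldl_map]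
    congr 1
    funext st col
    by_cases h : PySem.List.pyGetD col row 0 = 0 <;> simp [stepA, h]
  rw [hfun, foldA_char, holeAux_eq_count]
  simp

-- ===== VERDICT (by name: the statement is the Claim_ definition above) =====
theorem num_hole_rows_spec : Claim_equal_num_hole_rows := by
  intro board _ _
  unfold Spec_num_hole_rows num_hole_rows num_hole_rows_alt
  rw [show PySem.List.pyRange (((PySem.List.pyGetD board 0 []).length : Int) - 1) (-1) (-1)
        = (PySem.List.pyRange 0 ((PySem.List.pyGetD board 0 []).length : Int) 1).reverse by
      rw [PySem.List.pyRange_neg_one_eq_reverse]; norm_num]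
  simp only [row_indicator]
  exact (foldl_count_reverse
    (fun row => (board.map (fun col => !(PySem.List.pyGetD col row 0 == 0))).findIdx (fun v => !v)
      < (board.map (fun col => !(PySem.List.pyGetD col row 0 == 0))).countP id)
    (PySem.List.pyRange 0 ((PySem.List.pyGetD board 0 []).length : Int) 1))
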